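-- pv_equiv track=rewrite | github.com/MatsuTaku/PythonToTrial | practice/prac7.py | matchings
-- ===== SOURCE A (Python) =====
-- def matchings(mend, womend):
--     count = 0
--     # 全ての男性において，好みの女性が自分を好きかどうかが分かれば十分
--     for mname in mend.keys():
--         '''
--             dict.get(key)
--             存在するかわからないkeyで辞書からvalueを取り出す関数
--             なければ None
--         '''
--         if mname == womend.get(mend[mname]):
--             count += 1
--     return count
-- ===== SOURCE B (Python) =====
-- def matchings(mend, womend):
--     # Set-intersection formulation: a match is a pair (m, w) present in mend
--     # and, reversed, in womend.
--     return len(set(mend.items()) & {(m, w) for w, m in womend.items()})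
-- ===== Notes on version B (the rewrite author's own statement) =====
-- stated objective: idiomatic
-- what changed: Replaces the per-man loop with a counter and conditional womend.get lookup by building the set of (man, woman) pairs from mend and the reversed pair-set from womend and returning the size of their intersection.
import Mathlib
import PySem

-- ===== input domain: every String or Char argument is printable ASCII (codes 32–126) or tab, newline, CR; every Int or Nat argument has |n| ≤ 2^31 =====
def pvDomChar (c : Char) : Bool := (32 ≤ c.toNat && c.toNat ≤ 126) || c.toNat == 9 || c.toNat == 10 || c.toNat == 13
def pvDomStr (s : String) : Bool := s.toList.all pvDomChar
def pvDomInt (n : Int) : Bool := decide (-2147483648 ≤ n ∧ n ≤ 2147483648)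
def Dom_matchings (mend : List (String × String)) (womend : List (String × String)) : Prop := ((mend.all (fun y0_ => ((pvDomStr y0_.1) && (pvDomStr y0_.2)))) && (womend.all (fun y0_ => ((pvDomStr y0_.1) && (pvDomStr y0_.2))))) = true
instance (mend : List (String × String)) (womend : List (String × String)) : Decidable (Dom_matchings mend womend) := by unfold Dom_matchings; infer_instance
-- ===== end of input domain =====

-- B replaces A's per-man counter loop with the size of the intersection of the
-- (man, woman) pair-set of mend and the reversed pair-set of womend (objective: idiomatic).

-- ===== PORT A =====
-- for mname in mend.keys(): if mname == womend.get(mend[mname]): count += 1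
-- (mname ∈ mend.keys, so mend[mname] always succeeds; ported as getD with an unused default)
def matchings (mend : List (String × String)) (womend : List (String × String)) : Int :=
  let md := PySem.Dict.mk mend
  let wd := PySem.Dict.mk womend
  md.keys.foldl (fun count mname =>
    if wd.get? (md.getD mname "") = some mname then count + 1 else count) 0

-- ===== PORT B =====
-- len(set(mend.items()) & {(m, w) for w, m in womend.items()})
def matchings_alt (mend : List (String × String)) (womend : List (String × String)) : Int :=
  let a : PySem.Set (String × String) := PySem.Set.ofList mend
  let b : PySem.Set (String × String) :=
    PySem.Set.ofList (womend.map (fun p => (p.2, p.1)))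
  (PySem.Set.len (PySem.Set.inter a b) : Int)

-- ===== PRECONDITION & SPEC =====
-- The association lists stand for Python dicts, whose keys are unique; Pre_ excludes
-- lists with duplicate keys, which represent no Python dict input.
def Pre_matchings (mend : List (String × String)) (womend : List (String × String)) : Prop :=
  (mend.map Prod.fst).Nodup ∧ (womend.map Prod.fst).Nodup
instance (mend : List (String × String)) (womend : List (String × String)) : Decidable (Pre_matchings mend womend) := by unfold Pre_matchings; infer_instance

def pvWitness_matchings : (List (String × String)) × (List (String × String)) :=
  ([("adam", "eve"), ("bob", "carol")], [("eve", "adam"), ("carol", "dan")])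

def Spec_matchings (mend : List (String × String)) (womend : List (String × String)) (out : Int) : Prop := out = matchings_alt mend womend
instance (mend : List (String × String)) (womend : List (String × String)) (out : Int) : Decidable (Spec_matchings mend womend out) := by unfold Spec_matchings; infer_instance

-- ===== CLAIM (what is proved, stated in full; the proofs are below) =====
def Claim_equal_matchings : Prop := ∀ (mend : List (String × String)) (womend : List (String × String)), Dom_matchings mend womend → Pre_matchings mend womend → Spec_matchings mend womend (matchings mend womend)

-- ===== LEMMAS AND PROOFS =====

-- A's loop counts the pairs of mend whose reversal is an entry of womend.
theorem matchings_eq_countP (mend womend : List (String × String))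
    (h1 : (mend.map Prod.fst).Nodup) (h2 : (womend.map Prod.fst).Nodup) :
    matchings mend womend
      = (mend.countP (fun p => decide ((p.2, p.1) ∈ womend)) : Int) := by
  unfold matchings
  simp only [PySem.Dict.keys_mk, List.foldl_map]
  have hkm : (PySem.Dict.mk mend).keys.Nodup := by simpa [PySem.Dict.keys_mk] using h1
  have hkw : (PySem.Dict.mk womend).keys.Nodup := by simpa [PySem.Dict.keys_mk] using h2
  have hcongr :
      mend.foldl (fun count (p : String × String) =>
        if (PySem.Dict.mk womend).get? ((PySem.Dict.mk mend).getD p.1 "") = some p.1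
        then count + 1 else count) (0:Int)
      = mend.foldl (fun count (p : String × String) =>
        if (p.2, p.1) ∈ womend then count + 1 else count) (0:Int) := by
    apply PySem.List.foldl_congr_mem
    intro a p hp
    have hgd : (PySem.Dict.mk mend).getD p.1 "" = p.2 :=
      PySem.Dict.getD_of_mem_items _ (by simpa using hp) hkm ""
    rw [hgd]
    congr 1
    rw [eq_iff_iff, PySem.Dict.get?_eq_some_iff_mem_items _ p.2 p.1 hkw]
  rw [hcongr, PySem.List.foldl_ite_add_one]
  simp

-- B computes the same count via the set intersection.
theorem matchings_alt_eq_countP (mend womend : List (String × String))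
    (h1 : (mend.map Prod.fst).Nodup) (h2 : (womend.map Prod.fst).Nodup) :
    matchings_alt mend womend
      = (mend.countP (fun p => decide ((p.2, p.1) ∈ womend)) : Int) := by
  unfold matchings_alt
  have hm : mend.Nodup := h1.of_map
  have hw : (womend.map (fun p : String × String => (p.2, p.1))).Nodup :=
    (h2.of_map).map (fun a b h => by cases a; cases b; simpa [Prod.ext_iff, and_comm] using h)
  rw [PySem.Set.ofList_eq_self_of_nodup mend hm,
      PySem.Set.ofList_eq_self_of_nodup _ hw]
  simp only [PySem.Set.inter, PySem.Set.len, List.countP_eq_length_filter]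
  congr 2
  apply List.filter_congr
  intro p hp
  simp [List.mem_map, Prod.ext_iff]

-- ===== VERDICT (by name: the statement is the Claim_ definition above) =====
theorem matchings_spec : Claim_equal_matchings := by
  intro mend womend _ hpre
  unfold Spec_matchings
  rw [matchings_eq_countP mend womend hpre.1 hpre.2,
      matchings_alt_eq_countP mend womend hpre.1 hpre.2]
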